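-- pv_equiv track=rewrite | github.com/Schromeo/CodingStepByStep | OAPrepare/CS/dynaminc_nums_queries_ii.py | solution
-- ===== SOURCE A (Python) =====
-- from collections import Counter
--
-- def solution(a, b, queries):
--     # 1. 初始化: O(N + M) 时间
--     # ca_counts 是动态的 (会变), cb_counts 是静态的 (不变)
--     ca_counts = Counter(a)
--     cb_counts = Counter(b)
--
--     results = []
--
--     # 2. 遍历所有查询
--     for query in queries:
--         op_type = query[0]
--
--         if op_type == 0:
--             # --- 类型 0: 赋值 a[i] = x ---
--             i, x = query[1], query[2]
--
--             # a. 获取 a[i] 的旧值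
--             #    (必须从原数组 a 获取)
--             old_val = a[i]
--
--             # b. 在 a 数组中执行赋值
--             a[i] = x
--             new_val = x
--
--             # c. 更新 ca_counts: 旧值-1
--             ca_counts[old_val] -= 1
--             # 如果旧值计数为0, 从 map 中移除 (和 Java 逻辑保持一致)
--             if ca_counts[old_val] == 0:
--                 del ca_counts[old_val]
--
--             # d. 更新 ca_counts: 新值+1
--             ca_counts[new_val] += 1
--
--         else: # op_type == 1
--             # --- 类型 1: 查询 a[i] + b[j] == x ---
--             target_sum = query[1]
--             pair_count = 0
--
--             # --- 关键优化 ---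
--             # 我们遍历 ca_counts (来自数组 a),
--             # 因为 a.length <= 5e4, b.length <= 1e5。
--             # 遍历 ca_counts (N_unique) 总是比遍历 cb_counts (M_unique) 更快或一样快。
--
--             for num_a, count_a in ca_counts.items():
--                 # 寻找补数: b[j] = target_sum - num_a
--                 needed_from_b = target_sum - num_a
--
--                 # 从 cb_counts 中获取这个补数出现的次数
--                 # (如果 needed_from_b 不存在, cb_counts[...] 会返回 0)
--                 count_b = cb_counts[needed_from_b]
--
--                 if count_b > 0:
--                     pair_count += count_a * count_b
--
--             # 将此次查询的结果存入
--             results.append(pair_count)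
--
--     return results
-- ===== SOURCE B (Python) =====
-- from collections import Counter
--
-- def solution(a, b, queries):
--     # No dynamic counter of `a`: keep the raw array and scan it per query.
--     cb_counts = Counter(b)
--     results = []
--     for query in queries:
--         if query[0] == 0:
--             i, x = query[1], query[2]
--             a[i] = x
--         else:
--             target_sum = query[1]
--             results.append(sum(cb_counts[target_sum - v] for v in a))
--     return results
-- ===== Notes on version B (the rewrite author's own statement) =====
-- stated objective: simpler
-- what changed: B drops A's dynamically maintained Counter of `a` (and its whole decrement/delete-on-zero/increment bookkeeping branch): type-0 ops just assign a[i]=x, and each type-1 query scans the raw array, summing cb_counts[target-v] over every element instead of over distinct values weighted by maintained counts.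
import Mathlib
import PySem

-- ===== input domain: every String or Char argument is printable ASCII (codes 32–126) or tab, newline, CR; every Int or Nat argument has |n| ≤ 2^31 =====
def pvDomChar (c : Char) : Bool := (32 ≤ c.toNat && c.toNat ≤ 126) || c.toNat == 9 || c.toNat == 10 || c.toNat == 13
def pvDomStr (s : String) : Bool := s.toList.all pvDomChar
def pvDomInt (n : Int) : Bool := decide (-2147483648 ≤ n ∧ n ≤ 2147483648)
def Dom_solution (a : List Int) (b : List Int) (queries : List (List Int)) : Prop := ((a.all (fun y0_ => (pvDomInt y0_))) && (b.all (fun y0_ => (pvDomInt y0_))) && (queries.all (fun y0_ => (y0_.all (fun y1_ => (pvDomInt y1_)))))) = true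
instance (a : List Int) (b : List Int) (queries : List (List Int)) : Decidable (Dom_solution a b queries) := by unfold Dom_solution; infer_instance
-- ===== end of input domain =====

-- B drops A's dynamically maintained Counter of `a`: type-0 ops just assign, queries scan the raw
-- array summing complement counts from the static Counter of `b` (objective: simpler).
-- Both A and B mutate the Python argument `a` in place identically; the equivalence proved here is
-- about the RETURN value.

-- ===== PORT A =====
-- one step of A's query loop, carrying (current a, dynamic Counter of a, results)
def solutionStepA (cb : PySem.Dict Int Int) (s : List Int × PySem.Dict Int Int × List Int)
    (query : List Int) : List Int × PySem.Dict Int Int × List Int :=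
  if PySem.List.pyGetD query 0 0 = 0 then
    let i := PySem.List.pyGetD query 1 0
    let x := PySem.List.pyGetD query 2 0
    let oldVal := PySem.List.pyGetD s.1 i 0
    let a' := PySem.List.pySetD s.1 i x
    let ca1 := s.2.1.modify oldVal 0 (· - 1)
    let ca2 := if ca1.getD oldVal 0 = 0 then ca1.erase oldVal else ca1
    let ca3 := ca2.modify x 0 (· + 1)
    (a', ca3, s.2.2)
  else
    let targetSum := PySem.List.pyGetD query 1 0
    let pairCount := s.2.1.items.foldl
      (fun pairCount p =>
        let countB := cb.getD (targetSum - p.1) 0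
        if 0 < countB then pairCount + p.2 * countB else pairCount) 0
    (s.1, s.2.1, s.2.2 ++ [pairCount])

def solution (a : List Int) (b : List Int) (queries : List (List Int)) : List Int :=
  let caCounts := PySem.Dict.counter a
  let cbCounts := PySem.Dict.counter b
  (queries.foldl (solutionStepA cbCounts) (a, caCounts, [])).2.2

-- ===== PORT B =====
-- one step of B's loop, carrying (current a, results)
def solutionStepB (cb : PySem.Dict Int Int) (s : List Int × List Int) (query : List Int) :
    List Int × List Int :=
  if PySem.List.pyGetD query 0 0 = 0 then
    (PySem.List.pySetD s.1 (PySem.List.pyGetD query 1 0) (PySem.List.pyGetD query 2 0), s.2)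
  else
    let targetSum := PySem.List.pyGetD query 1 0
    (s.1, s.2 ++ [(s.1.map (fun v => cb.getD (targetSum - v) 0)).sum])

def solution_alt (a : List Int) (b : List Int) (queries : List (List Int)) : List Int :=
  let cbCounts := PySem.Dict.counter b
  (queries.foldl (solutionStepB cbCounts) (a, [])).2

-- ===== PRECONDITION & SPEC =====
-- Pre_ excludes exactly the inputs where Python A raises an IndexError: a query shorter than its
-- opcode requires, or a type-0 query whose index i is out of range for a (a's length never changes).
def Pre_solution (a : List Int) (b : List Int) (queries : List (List Int)) : Prop :=
  ∀ q ∈ queries,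
    (PySem.List.pyGetD q 0 0 = 0 →
      3 ≤ q.length ∧ PySem.Raise.InRange a.length (PySem.List.pyGetD q 1 0)) ∧
    (PySem.List.pyGetD q 0 0 ≠ 0 → 2 ≤ q.length)

instance (a : List Int) (b : List Int) (queries : List (List Int)) :
    Decidable (Pre_solution a b queries) := by
  unfold Pre_solution PySem.Raise.InRange; infer_instance

def pvWitness_solution : List Int × List Int × List (List Int) :=
  ([1, 2], [1], [[0, 0, 2], [1, 3]])

def Spec_solution (a : List Int) (b : List Int) (queries : List (List Int)) (out : List Int) : Prop := out = solution_alt a b queries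
instance (a : List Int) (b : List Int) (queries : List (List Int)) (out : List Int) : Decidable (Spec_solution a b queries out) := by unfold Spec_solution; infer_instance

-- ===== CLAIM (what is proved, stated in full; the proofs are below) =====
def Claim_equal_solution : Prop := ∀ (a : List Int) (b : List Int) (queries : List (List Int)), Dom_solution a b queries → Pre_solution a b queries → Spec_solution a b queries (solution a b queries)

-- ===== LEMMAS AND PROOFS =====

-- invariant tying A's dynamic counter to the current array
def DInv (aL : List Int) (ca : PySem.Dict Int Int) : Prop :=
  ca.keys.Nodup ∧ (∀ v : Int, ca.getD v 0 = (aL.count v : Int)) ∧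
    (∀ v : Int, v ∈ aL → v ∈ ca.keys)

lemma find?_filter_ne (l : List (Int × Int)) (k v : Int) :
    List.find? (fun p => p.1 == v) (l.filter (fun p => !(p.1 == k))) =
      if v = k then none else List.find? (fun p => p.1 == v) l := by
  by_cases hvk : v = k
  · subst hvk
    rw [if_pos rfl, List.find?_eq_none]
    intro p hp
    simp only [List.mem_filter] at hp
    simpa using fun h => by simp [h] at hp
  · rw [if_neg hvk]
    induction l with
    | nil => simp
    | cons p l ih =>
      by_cases hk : p.1 = k
      · have hv : ¬ p.1 = v := by rw [hk]; exact fun h => hvk h.symm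
        rw [List.find?_cons_of_neg (by simp [hv])]
        simp [hk, ih]
      · by_cases hv : p.1 = v
        · simp only [List.filter_cons]
          rw [if_pos (by simp [hk])]
          rw [List.find?_cons_of_pos (by simp [hv]), List.find?_cons_of_pos (by simp [hv])]
        · rw [List.find?_cons_of_neg (by simp [hv])]
          simp only [List.filter_cons]
          rw [if_pos (by simp [hk])]
          rw [List.find?_cons_of_neg (by simp [hv])]
          exact ih

lemma dict_getD_erase (d : PySem.Dict Int Int) (k v : Int) :
    (d.erase k).getD v 0 = if v = k then 0 else d.getD v 0 := by
  simp only [PySem.Dict.getD, PySem.Dict.get?, PySem.Dict.erase, find?_filter_ne]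
  split <;> simp

lemma dict_mem_keys_erase (d : PySem.Dict Int Int) (k v : Int) :
    v ∈ (d.erase k).keys ↔ v ∈ d.keys ∧ v ≠ k := by
  simp only [PySem.Dict.erase, PySem.Dict.keys, List.mem_map, List.mem_filter]
  constructor
  · rintro ⟨p, ⟨hp, hpk⟩, rfl⟩
    exact ⟨⟨p, hp, rfl⟩, by simpa using hpk⟩
  · rintro ⟨⟨p, hp, rfl⟩, hne⟩
    exact ⟨p, ⟨hp, by simpa using hne⟩, rfl⟩

lemma dict_nodup_keys_erase (d : PySem.Dict Int Int) (k : Int) (h : d.keys.Nodup) :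
    (d.erase k).keys.Nodup := by
  simp only [PySem.Dict.erase, PySem.Dict.keys] at *
  exact (List.filter_sublist.map _).nodup h

lemma count_set_int (l : List Int) (j : Nat) (x v : Int) (h : j < l.length) :
    (((l.set j x).count v : Int)) =
      (l.count v : Int) - (if l[j] = v then 1 else 0) + (if x = v then 1 else 0) := by
  induction l generalizing j with
  | nil => simp at h
  | cons a l ih =>
    cases j with
    | zero =>
      simp only [List.set_cons_zero, List.count_cons, List.getElem_cons_zero]
      by_cases hx : x = v <;> by_cases ha : a = v <;> simp [hx, ha]
    | succ j =>
      have hj : j < l.length := by simpa using h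
      simp only [List.set_cons_succ, List.count_cons, List.getElem_cons_succ]
      by_cases ha : a = v <;> (simp [ha, ih j hj]; try omega)

lemma py_get_set (xs : List Int) (i x : Int) (h : PySem.Raise.InRange xs.length i) :
    ∃ j : Nat, ∃ hj : j < xs.length,
      PySem.List.pyGetD xs i 0 = xs[j] ∧ PySem.List.pySetD xs i x = xs.set j x := by
  obtain ⟨h1, h2⟩ := h
  by_cases h0 : 0 ≤ i
  · refine ⟨i.toNat, by omega, ?_, ?_⟩ <;>
      simp [PySem.List.pyGetD, PySem.List.pyGet?, PySem.List.pySetD, PySem.List.pySet?,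
        PySem.List.pyIdx?, h0, h2, show i.toNat < xs.length by omega]
  · refine ⟨xs.length - (-i).toNat, by omega, ?_, ?_⟩ <;>
      simp [PySem.List.pyGetD, PySem.List.pyGet?, PySem.List.pySetD, PySem.List.pySet?,
        PySem.List.pyIdx?, h0, h1, show xs.length - (-i).toNat < xs.length by omega]

lemma sum_ite_single (ks : List Int) (hnd : ks.Nodup) (x : Int) (hx : x ∈ ks) (g : Int → Int) :
    (ks.map (fun k => if k = x then g k else 0)).sum = g x := by
  induction ks with
  | nil => simp at hx
  | cons a ks ih =>
    rcases List.mem_cons.1 hx with rfl | hx'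
    · have hz : (ks.map (fun k => if k = x then g k else 0)).sum = 0 := by
        apply List.sum_eq_zero
        intro y hy
        obtain ⟨k, hk, rfl⟩ := List.mem_map.1 hy
        rw [if_neg]
        rintro rfl
        exact (List.nodup_cons.1 hnd).1 hk
      simp [hz]
    · have hax : ¬ a = x := by rintro rfl; exact (List.nodup_cons.1 hnd).1 hx'
      simp [hax, ih (List.nodup_cons.1 hnd).2 hx']

lemma count_sum (ks : List Int) (hnd : ks.Nodup) (l : List Int)
    (hsub : ∀ v ∈ l, v ∈ ks) (g : Int → Int) :
    (ks.map (fun k => (l.count k : Int) * g k)).sum = (l.map g).sum := by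
  induction l with
  | nil => simp
  | cons v l ih =>
    have h1 : (ks.map (fun k => ((v :: l).count k : Int) * g k)).sum =
        (ks.map (fun k => (l.count k : Int) * g k + (if k = v then g k else 0))).sum := by
      congr 1
      apply List.map_congr_left
      intro k hk
      by_cases hkv : k = v
      · subst hkv; simp only [List.count_cons, beq_self_eq_true, if_true]; push_cast; ring
      · simp only [List.count_cons, beq_iff_eq, hkv, if_false]; push_cast
        rw [if_neg (fun h => hkv h.symm)]; ring
    rw [h1, List.sum_map_add]
    rw [ih (fun w hw => hsub w (List.mem_cons_of_mem _ hw)),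
      sum_ite_single ks hnd v (hsub v (List.mem_cons_self)) g]
    simp [add_comm]

lemma fold_if_pos (cb : PySem.Dict Int Int) (t : Int) (hcb : ∀ k, 0 ≤ cb.getD k 0)
    (l : List (Int × Int)) (init : Int) :
    l.foldl (fun pc p =>
        if 0 < cb.getD (t - p.1) 0 then pc + p.2 * cb.getD (t - p.1) 0 else pc) init =
      init + (l.map (fun p => p.2 * cb.getD (t - p.1) 0)).sum := by
  induction l generalizing init with
  | nil => simp
  | cons p l ih =>
    simp only [List.foldl_cons, List.map_cons, List.sum_cons, ih]
    by_cases hp : 0 < cb.getD (t - p.1) 0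
    · rw [if_pos hp]; ring
    · rw [if_neg hp]
      have h0 : cb.getD (t - p.1) 0 = 0 := le_antisymm (by omega) (hcb (t - p.1))
      rw [h0]; ring

lemma query_eq (cb : PySem.Dict Int Int) (hcb : ∀ k, 0 ≤ cb.getD k 0)
    (aL : List Int) (ca : PySem.Dict Int Int) (hInv : DInv aL ca) (t : Int) :
    ca.items.foldl
      (fun pairCount p =>
        if 0 < cb.getD (t - p.1) 0 then pairCount + p.2 * cb.getD (t - p.1) 0
        else pairCount) 0 =
      (aL.map (fun v => cb.getD (t - v) 0)).sum := by
  obtain ⟨hnd, hcount, hmem⟩ := hInv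
  rw [fold_if_pos cb t hcb ca.items 0, zero_add]
  rw [PySem.Dict.items_eq_map_keys ca hnd 0, List.map_map]
  have hcongr : (ca.keys.map ((fun p : Int × Int => p.2 * cb.getD (t - p.1) 0) ∘
      (fun k => (k, ca.getD k 0)))) =
      ca.keys.map (fun k => (aL.count k : Int) * cb.getD (t - k) 0) := by
    apply List.map_congr_left
    intro k _
    simp [Function.comp, hcount k]
  rw [hcongr, count_sum ca.keys hnd aL hmem (fun k => cb.getD (t - k) 0)]

lemma inv_step (aL : List Int) (ca : PySem.Dict Int Int) (hInv : DInv aL ca) (i x : Int)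
    (h : PySem.Raise.InRange aL.length i) :
    DInv (PySem.List.pySetD aL i x)
      ((if (ca.modify (PySem.List.pyGetD aL i 0) 0 (· - 1)).getD (PySem.List.pyGetD aL i 0) 0 = 0
          then (ca.modify (PySem.List.pyGetD aL i 0) 0 (· - 1)).erase (PySem.List.pyGetD aL i 0)
          else ca.modify (PySem.List.pyGetD aL i 0) 0 (· - 1)).modify x 0 (· + 1)) := by
  obtain ⟨hnd, hcount, hmem⟩ := hInv
  obtain ⟨j, hj, hget, hset⟩ := py_get_set aL i x h
  rw [hget, hset]
  set old := aL[j] with hold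
  set ca1 := ca.modify old 0 (· - 1) with hca1
  set ca2 := if ca1.getD old 0 = 0 then ca1.erase old else ca1 with hca2
  -- getD formulas
  have hg1 : ∀ v : Int, ca1.getD v 0 = if v = old then ca.getD old 0 - 1 else ca.getD v 0 := by
    intro v; rw [hca1, PySem.Dict.getD_modify]
  have hg2 : ∀ v : Int, ca2.getD v 0 = ca1.getD v 0 := by
    intro v
    rw [hca2]
    split
    · rename_i hz
      rw [dict_getD_erase]
      split
      · rename_i hv; rw [hv, hz]
      · rfl
    · rfl
  have hg3 : ∀ v : Int,
      (ca2.modify x 0 (· + 1)).getD v 0 = if v = x then ca2.getD x 0 + 1 else ca2.getD v 0 := by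
    intro v; rw [PySem.Dict.getD_modify]
  -- nodup
  have hnd1 : ca1.keys.Nodup := by
    rw [hca1, PySem.Dict.modify]; exact PySem.Dict.nodup_keys_insert _ _ _ hnd
  have hnd2 : ca2.keys.Nodup := by
    rw [hca2]; split
    · exact dict_nodup_keys_erase _ _ hnd1
    · exact hnd1
  have hmem1 : ∀ v : Int, v ∈ ca.keys → v ∈ ca1.keys := by
    intro v hv
    rw [hca1, PySem.Dict.modify]
    exact (PySem.Dict.mem_keys_insert _ _ _ _).2 (Or.inr hv)
  refine ⟨?_, ?_, ?_⟩
  · rw [PySem.Dict.modify]; exact PySem.Dict.nodup_keys_insert _ _ _ hnd2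
  · intro v
    have hoc : 0 < aL.count old := List.count_pos_iff.2 (List.getElem_mem hj)
    rw [hg3, hg2, hg2, hg1, hg1, count_set_int aL j x v hj, ← hold]
    simp only [hcount]
    split_ifs <;> subst_vars <;> omega
  · intro v hv
    have hvcount : 0 < (aL.set j x).count v := List.count_pos_iff.2 hv
    have hceq := count_set_int aL j x v hj
    rw [PySem.Dict.modify, PySem.Dict.mem_keys_insert]
    by_cases hvx : v = x
    · exact Or.inl hvx
    · refine Or.inr ?_
      have hvaL : v ∈ aL := by
        by_contra hno
        rw [List.count_eq_zero.2 hno] at hceq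
        split_ifs at hceq <;> omega
      rw [hca2]
      split
      · rename_i hz
        rw [dict_mem_keys_erase]
        refine ⟨hmem1 v (hmem v hvaL), ?_⟩
        -- if v = old, erased means count old = 1, but v survives in set with v ≠ x: contradiction
        rintro rfl
        rw [hg1, if_pos rfl, hcount] at hz
        rw [← hold] at hceq
        split_ifs at hceq <;> omega
      · exact hmem1 v (hmem v hvaL)

lemma loop_eq (cb : PySem.Dict Int Int) (hcb : ∀ k, 0 ≤ cb.getD k 0)
    (queries : List (List Int)) :
    ∀ (aL : List Int) (ca : PySem.Dict Int Int) (res : List Int),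
      (∀ q ∈ queries,
        (PySem.List.pyGetD q 0 0 = 0 →
          3 ≤ q.length ∧ PySem.Raise.InRange aL.length (PySem.List.pyGetD q 1 0)) ∧
        (PySem.List.pyGetD q 0 0 ≠ 0 → 2 ≤ q.length)) →
      DInv aL ca →
      (queries.foldl (solutionStepA cb) (aL, ca, res)).2.2 =
        (queries.foldl (solutionStepB cb) (aL, res)).2 := by
  induction queries with
  | nil => intro aL ca res _ _; rfl
  | cons q qs ih =>
    intro aL ca res hq hInv
    simp only [List.foldl_cons]
    by_cases hop : PySem.List.pyGetD q 0 0 = 0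
    · have hir := ((hq q List.mem_cons_self).1 hop).2
      have hlen : (PySem.List.pySetD aL (PySem.List.pyGetD q 1 0) (PySem.List.pyGetD q 2 0)).length
          = aL.length := by
        obtain ⟨j, hj, _, hset⟩ := py_get_set aL (PySem.List.pyGetD q 1 0)
          (PySem.List.pyGetD q 2 0) hir
        rw [hset, List.length_set]
      simp only [solutionStepA, solutionStepB, hop, if_pos]
      exact ih _ _ _ (by rw [hlen]; exact fun q' hq' => hq q' (List.mem_cons_of_mem _ hq'))
        (inv_step aL ca hInv _ _ hir)
    · simp only [solutionStepA, solutionStepB, hop]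
      rw [query_eq cb hcb aL ca hInv (PySem.List.pyGetD q 1 0)]
      exact ih _ _ _ (fun q' hq' => hq q' (List.mem_cons_of_mem _ hq')) hInv

-- ===== VERDICT (by name: the statement is the Claim_ definition above) =====
theorem solution_spec : Claim_equal_solution := by
  intro a b queries _ hpre
  unfold Spec_solution solution solution_alt
  refine loop_eq _ (fun k => ?_) queries a _ [] hpre ?_
  · rw [PySem.Dict.getD_counter]; exact Int.natCast_nonneg _
  · refine ⟨PySem.Dict.nodup_keys_counter a, fun v => PySem.Dict.getD_counter a v, fun v hv => ?_⟩
    rw [PySem.Dict.keys_counter]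
    exact (PySem.Set.mem_ofList a v).2 hv
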